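-- pv_equiv track=rewrite | github.com/SohamRatnaparkhi/Python-Code | Random/google.py | checkConnectionHorizontal
-- ===== SOURCE A (Python) =====
-- def checkConnectionHorizontal(r, j):
--     row = list(r)
--     for i in range(j - 1, -1, -1):
--         if row[i] != 1:
--             for k in range(j + 1, len(row), 1):
--                 if row[k] != 1:
--                     return False
--
--
--     return True
-- ===== SOURCE B (Python) =====
-- def checkConnectionHorizontal(r, j):
--     row = list(r)
--     bad = [i for i, x in enumerate(row) if x != 1]
--     return not (any(i < j for i in bad) and any(i > j for i in bad))
-- ===== Notes on version B (the rewrite author's own statement) =====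
-- stated objective: simpler
-- what changed: Replaces A's nested re-scan (for each non-1 left of j, re-scan the whole right side) by building an index table of non-1 positions in one enumerate pass and answering with one positional query over that table.
import Mathlib
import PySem

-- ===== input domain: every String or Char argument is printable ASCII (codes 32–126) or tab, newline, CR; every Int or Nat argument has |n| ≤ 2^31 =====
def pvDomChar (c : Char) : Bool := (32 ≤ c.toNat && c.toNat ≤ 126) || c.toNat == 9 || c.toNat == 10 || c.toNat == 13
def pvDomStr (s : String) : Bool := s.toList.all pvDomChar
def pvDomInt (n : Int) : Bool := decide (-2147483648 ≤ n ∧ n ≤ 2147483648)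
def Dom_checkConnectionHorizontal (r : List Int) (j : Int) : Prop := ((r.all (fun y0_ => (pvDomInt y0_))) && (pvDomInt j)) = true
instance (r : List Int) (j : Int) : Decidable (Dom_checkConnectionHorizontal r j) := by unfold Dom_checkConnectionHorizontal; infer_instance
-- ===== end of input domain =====

-- B builds the table of non-1 positions once and answers with one positional query,
-- replacing A's nested re-scanning; return-value equivalence proved on Pre_ (j ≤ len r).

-- ===== PORT A =====
-- inner loop: 'for k in range(j+1, len(row)): if row[k] != 1: return False' —
-- returns true iff some scanned position holds a non-1 (out-of-range default 1 is
-- unreachable inside Pre_).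
def chInnerBad (row : List Int) : List Int → Bool
  | [] => false
  | k :: ks => if PySem.List.pyGetD row k 1 ≠ 1 then true else chInnerBad row ks

-- outer loop over range(j-1, -1, -1)
def chOuter (row : List Int) (j : Int) : List Int → Bool
  | [] => true
  | i :: is =>
    if PySem.List.pyGetD row i 1 ≠ 1 then
      if chInnerBad row (PySem.List.pyRange (j + 1) (row.length : Int) 1) then false
      else chOuter row j is
    else chOuter row j is

def checkConnectionHorizontal (r : List Int) (j : Int) : Bool :=
  chOuter r j (PySem.List.pyRange (j - 1) (-1) (-1))

-- ===== PORT B =====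
-- bad = [i for i, x in enumerate(row) if x != 1]
def badTable (r : List Int) : List Int :=
  (PySem.List.enumerate r 0).filterMap (fun p => if p.2 ≠ 1 then some p.1 else none)

def checkConnectionHorizontal_alt (r : List Int) (j : Int) : Bool :=
  let bad := badTable r
  !(bad.any (fun i => i < j) && bad.any (fun i => i > j))

-- ===== PRECONDITION & SPEC =====
-- For j > len(r) Python A raises IndexError at row[j-1]; those inputs are excluded.
def Pre_checkConnectionHorizontal (r : List Int) (j : Int) : Prop := j ≤ (r.length : Int)
instance (r : List Int) (j : Int) : Decidable (Pre_checkConnectionHorizontal r j) := by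
  unfold Pre_checkConnectionHorizontal; infer_instance

def pvWitness_checkConnectionHorizontal : List Int × Int := ([2, 1, 2], 1)

def Spec_checkConnectionHorizontal (r : List Int) (j : Int) (out : Bool) : Prop := out = checkConnectionHorizontal_alt r j
instance (r : List Int) (j : Int) (out : Bool) : Decidable (Spec_checkConnectionHorizontal r j out) := by unfold Spec_checkConnectionHorizontal; infer_instance

-- ===== CLAIM (what is proved, stated in full; the proofs are below) =====
def Claim_equal_checkConnectionHorizontal : Prop := ∀ (r : List Int) (j : Int), Dom_checkConnectionHorizontal r j → Pre_checkConnectionHorizontal r j → Spec_checkConnectionHorizontal r j (checkConnectionHorizontal r j)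

-- ===== LEMMAS AND PROOFS =====

theorem chInnerBad_eq_any (row : List Int) (ks : List Int) :
    chInnerBad row ks = ks.any (fun k => decide (PySem.List.pyGetD row k 1 ≠ 1)) := by
  induction ks with
  | nil => rfl
  | cons k ks ih =>
    simp only [chInnerBad, ih, List.any_cons]
    split_ifs with h <;> simp [h]

theorem chOuter_eq (row : List Int) (j : Int) (is : List Int) :
    chOuter row j is =
      !(is.any (fun i => decide (PySem.List.pyGetD row i 1 ≠ 1)) &&
        chInnerBad row (PySem.List.pyRange (j + 1) (row.length : Int) 1)) := by
  induction is with
  | nil => rfl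
  | cons i is ih =>
    simp only [chOuter, List.any_cons]
    split_ifs with h1 h2 <;> simp_all

theorem mem_badTable (r : List Int) (i : Int) :
    i ∈ badTable r ↔ ∃ (k : Nat), ∃ (h : k < r.length), r[k] ≠ 1 ∧ i = (k : Int) := by
  simp only [badTable, List.mem_filterMap, PySem.List.mem_enumerate_iff]
  constructor
  · rintro ⟨p, ⟨k, hk, rfl⟩, hp⟩
    by_cases h : r[k] ≠ 1
    · rw [if_pos h] at hp
      exact ⟨k, hk, h, by simpa using hp.symm⟩
    · rw [if_neg h] at hp
      simp at hp
  · rintro ⟨k, hk, h1, rfl⟩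
    exact ⟨((k : Int), r[k]), ⟨k, hk, by simp⟩, by simp [h1]⟩

theorem left_any_eq (r : List Int) (j : Int) :
    (PySem.List.pyRange (j - 1) (-1) (-1)).any (fun i => decide (PySem.List.pyGetD r i 1 ≠ 1)) =
    (badTable r).any (fun i => decide (i < j)) := by
  apply Bool.eq_iff_iff.mpr
  simp only [List.any_eq_true, PySem.List.mem_pyRange_neg_one, decide_eq_true_eq]
  constructor
  · rintro ⟨x, ⟨hx0, hxj⟩, hx⟩
    have h0 : 0 ≤ x := by omega
    have hget : PySem.List.pyGetD r x 1 = r.getD x.toNat 1 := by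
      rw [← PySem.List.pyGetD_natCast (xs := r) (n := x.toNat) (d := 1)]
      congr 1
      omega
    have hlt : x.toNat < r.length := by
      by_contra h
      exact hx (by rw [hget, List.getD_eq_default _ _ (by omega)])
    refine ⟨x, (mem_badTable r x).mpr ⟨x.toNat, hlt, ?_, by omega⟩, by omega⟩
    rw [hget, List.getD_eq_getElem _ _ hlt] at hx; exact hx
  · rintro ⟨i, hi, hij⟩
    obtain ⟨k, hk, hk1, rfl⟩ := (mem_badTable r i).mp hi
    refine ⟨(k : Int), ⟨by omega, by omega⟩, ?_⟩
    rw [PySem.List.pyGetD_natCast, List.getD_eq_getElem _ _ hk]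
    exact hk1

theorem right_any_eq (r : List Int) (j : Int) (hj : 0 ≤ j) :
    (PySem.List.pyRange (j + 1) (r.length : Int) 1).any (fun i => decide (PySem.List.pyGetD r i 1 ≠ 1)) =
    (badTable r).any (fun i => decide (i > j)) := by
  apply Bool.eq_iff_iff.mpr
  simp only [List.any_eq_true, PySem.List.mem_pyRange_one, decide_eq_true_eq]
  constructor
  · rintro ⟨x, ⟨hx0, hxn⟩, hx⟩
    have h0 : 0 ≤ x := by omega
    have hlt : x.toNat < r.length := by omega
    refine ⟨x, (mem_badTable r x).mpr ⟨x.toNat, hlt, ?_, by omega⟩, by omega⟩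
    rw [show x = (x.toNat : Int) by omega, PySem.List.pyGetD_natCast,
      List.getD_eq_getElem _ _ hlt] at hx
    exact hx
  · rintro ⟨i, hi, hij⟩
    obtain ⟨k, hk, hk1, rfl⟩ := (mem_badTable r i).mp hi
    refine ⟨(k : Int), ⟨by omega, by omega⟩, ?_⟩
    rw [PySem.List.pyGetD_natCast, List.getD_eq_getElem _ _ hk]
    exact hk1

-- ===== VERDICT (by name: the statement is the Claim_ definition above) =====
theorem checkConnectionHorizontal_spec : Claim_equal_checkConnectionHorizontal := by
  intro r j _ _
  unfold Spec_checkConnectionHorizontal checkConnectionHorizontal checkConnectionHorizontal_alt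
  rw [chOuter_eq, chInnerBad_eq_any, left_any_eq]
  by_cases hj : 0 ≤ j
  · rw [right_any_eq r j hj]
  · -- j < 0: the left scan is vacuous on both sides
    have hL : (badTable r).any (fun i => decide (i < j)) = false := by
      rw [List.any_eq_false]
      intro i hi
      obtain ⟨k, hk, _, rfl⟩ := (mem_badTable r i).mp hi
      simp; omega
    simp [hL]
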